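-- pv_equiv track=rewrite | github.com/sangtq13/Data_Algorithm_Programming | Python/partition_list.py | PartitionList3
-- ===== SOURCE A (Python) =====
-- def PartitionList3(nums, k):
--     a = []
--     b = []
--     e = []
--     for num in nums:
--         if num < k:
--             a.append(num)
--         elif num == k:
--             e.append(num)
--         elif num > k:
--             b.append(num)
--     return a + e + b
-- ===== SOURCE B (Python) =====
-- def PartitionList3(nums, k):
--     return [x for x in nums if x < k] + [x for x in nums if x == k] + [x for x in nums if x > k]
-- ===== Notes on version B (the rewrite author's own statement) =====
-- stated objective: simpler
-- what changed: Replaces the single pass with three mutable accumulator buckets by three independent stable filter scans concatenated, with no intermediate state.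
import Mathlib
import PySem

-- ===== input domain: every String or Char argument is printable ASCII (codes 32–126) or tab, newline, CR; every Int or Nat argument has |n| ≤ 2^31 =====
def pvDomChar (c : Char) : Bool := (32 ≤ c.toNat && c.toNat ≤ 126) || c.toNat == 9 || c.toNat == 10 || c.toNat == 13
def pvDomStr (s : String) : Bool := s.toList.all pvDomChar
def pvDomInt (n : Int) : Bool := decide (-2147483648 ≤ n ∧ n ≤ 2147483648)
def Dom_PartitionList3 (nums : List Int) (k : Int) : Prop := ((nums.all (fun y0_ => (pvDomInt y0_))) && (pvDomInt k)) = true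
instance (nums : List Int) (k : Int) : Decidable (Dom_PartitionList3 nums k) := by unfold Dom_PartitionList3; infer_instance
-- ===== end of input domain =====

-- B replaces A's single pass with three mutable buckets by three independent stable filter scans concatenated (simpler decomposition, same cost).


-- ===== PORT A =====
-- A: one pass pushing each num into bucket a / e / b, then a ++ e ++ b
def pvLoopA (nums : List Int) (k : Int) (st : List Int × List Int × List Int) :
    List Int × List Int × List Int :=
  match nums with
  | [] => st
  | num :: rest =>
    let (a, e, b) := st
    pvLoopA rest k
      (if num < k then (a ++ [num], e, b)
       else if num == k then (a, e ++ [num], b)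
       else if num > k then (a, e, b ++ [num])
       else (a, e, b))

def PartitionList3 (nums : List Int) (k : Int) : List Int :=
  let (a, e, b) := pvLoopA nums k ([], [], [])
  a ++ e ++ b

-- ===== PORT B =====
-- B: three independent comprehension-style filters, concatenated
def PartitionList3_alt (nums : List Int) (k : Int) : List Int :=
  nums.filter (fun x => x < k) ++ nums.filter (fun x => x == k) ++ nums.filter (fun x => x > k)

-- ===== PRECONDITION & SPEC =====
def Spec_PartitionList3 (nums : List Int) (k : Int) (out : List Int) : Prop := out = PartitionList3_alt nums k
instance (nums : List Int) (k : Int) (out : List Int) : Decidable (Spec_PartitionList3 nums k out) := by unfold Spec_PartitionList3; infer_instance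

-- ===== CLAIM (what is proved, stated in full; the proofs are below) =====
def Claim_equal_PartitionList3 : Prop := ∀ (nums : List Int) (k : Int), Dom_PartitionList3 nums k → Spec_PartitionList3 nums k (PartitionList3 nums k)

-- ===== LEMMAS AND PROOFS =====

-- ===== VERDICT (by name: the statement is the Claim_ definition above) =====
lemma pvLoopA_eq (nums : List Int) (k : Int) (a e b : List Int) :
    pvLoopA nums k (a, e, b) =
      (a ++ nums.filter (fun x => x < k),
       e ++ nums.filter (fun x => x == k),
       b ++ nums.filter (fun x => x > k)) := by
  induction nums generalizing a e b with
  | nil => simp [pvLoopA]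
  | cons num rest ih =>
    by_cases h1 : num < k
    · simp only [pvLoopA, if_pos h1, ih]
      simp [List.filter_cons]
      omega
    · by_cases h2 : num = k
      · simp [pvLoopA, h2, ih]
      · have h3 : num > k := by omega
        simp only [pvLoopA, if_neg h1, ih]
        simp [List.filter_cons, h2, h3]
        omega

theorem PartitionList3_spec : Claim_equal_PartitionList3 := by
  intro nums k _
  unfold Spec_PartitionList3 PartitionList3 PartitionList3_alt
  simp [pvLoopA_eq]
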